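-- pv_equiv track=rewrite | github.com/Boeing773ER/Text-Editor | Structure.py | get_next_item
-- ===== SOURCE A (Python) =====
-- def get_next_item(str_a, item):
--     # next element or sign
--     # return new_str, item
--     i = 0
--     if str_a[i] == '(' or str_a[i] == ')' or str_a[i] == '&' or str_a[i] == '|':
--         item.append(str_a[i])
--         return str_a[1:]
--     else:
--         for i in range(len(str_a)):
--             if str_a[i] == '(' or str_a[i] == ')' or str_a[i] == '&' or str_a[i] == '|':
--                 item.append(str_a[:i])
--                 return str_a[i:]
--         item.append(str_a[:i+1])
--         return ""
-- ===== SOURCE B (Python) =====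
-- def get_next_item(str_a, item):
--     # Same return value and same in-place append to `item` as A.
--     # Instead of locating the split index, B CONSTRUCTS the token with an
--     # accumulator (for-each over the characters, break at a delimiter),
--     # then derives the remainder from the token's length; the no-delimiter
--     # case needs no separate branch.
--     if str_a[0] in "()&|":
--         item.append(str_a[0])
--         return str_a[1:]
--     buf = []
--     for ch in str_a:
--         if ch in "()&|":
--             break
--         buf.append(ch)
--     token = "".join(buf)
--     item.append(token)
--     return str_a[len(token):]
-- ===== Notes on version B (the rewrite author's own statement) =====
-- stated objective: alternative
-- what changed: A locates the index of the first delimiter with an indexed range-loop and then slices twice (with a separate fall-through branch when no delimiter exists); B never computes an index: it builds the token itself character by character with an accumulator (break on a delimiter), joins it, and takes the remainder from the token's length, so the no-delimiter case is handled uniformly.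
import Mathlib
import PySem

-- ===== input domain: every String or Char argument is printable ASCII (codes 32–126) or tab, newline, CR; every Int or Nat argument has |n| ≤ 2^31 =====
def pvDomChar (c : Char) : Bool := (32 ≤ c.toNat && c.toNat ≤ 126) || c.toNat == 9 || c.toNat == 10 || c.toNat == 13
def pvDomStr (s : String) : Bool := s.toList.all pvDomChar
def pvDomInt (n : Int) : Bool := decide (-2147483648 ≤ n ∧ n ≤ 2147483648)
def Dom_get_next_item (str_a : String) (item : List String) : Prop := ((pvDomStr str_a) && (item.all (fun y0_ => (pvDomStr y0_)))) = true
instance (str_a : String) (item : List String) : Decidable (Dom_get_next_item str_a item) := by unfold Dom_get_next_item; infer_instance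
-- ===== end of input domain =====

-- B builds the token with an accumulator instead of locating a split index (objective: alternative, same cost).
-- Both Pythons also append the extracted token to `item` in place (identically); the theorems are about the return value only.

-- ===== PORT A =====
def gniDelim (c : Char) : Bool := c == '(' || c == ')' || c == '&' || c == '|'

-- A's for-loop over range(len(str_a)): first index whose char is a delimiter
def gniScanA : List Char → Option Nat
  | [] => none
  | c :: rest => if gniDelim c then some 0 else (gniScanA rest).map (· + 1)

def get_next_item (str_a : String) (item : List String) : String :=
  let cs := str_a.toList
  match cs with
  | [] => ""   -- str_a[0] raises IndexError in Python; excluded by Pre_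
  | c :: rest =>
    if gniDelim c then String.mk rest          -- str_a[1:]
    else
      match gniScanA cs with
      | some i => String.mk (cs.drop i)        -- str_a[i:]
      | none => ""                             -- loop falls through: returns ""

-- ===== PORT B =====
-- B's for-loop with break: accumulate characters up to the first delimiter
def gniBuf : List Char → List Char
  | [] => []
  | c :: rest => if ['(', ')', '&', '|'].contains c then [] else c :: gniBuf rest

def get_next_item_alt (str_a : String) (item : List String) : String :=
  let cs := str_a.toList
  match cs with
  | [] => ""   -- str_a[0] raises IndexError in Python; excluded by Pre_
  | c :: rest =>
    if ['(', ')', '&', '|'].contains c then String.mk rest   -- str_a[0] in "()&|" → str_a[1:]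
    else
      let token := gniBuf cs                   -- buf accumulated by the loop, joined
      String.mk (cs.drop token.length)         -- str_a[len(token):]

-- ===== PRECONDITION & SPEC =====
-- A (and B) raise IndexError on the empty string (str_a[0]); only that input is excluded.
def Pre_get_next_item (str_a : String) (item : List String) : Prop := str_a ≠ ""
instance (str_a : String) (item : List String) : Decidable (Pre_get_next_item str_a item) := by unfold Pre_get_next_item; infer_instance
def pvWitness_get_next_item : String × List String := ("ab&c", [])

def Spec_get_next_item (str_a : String) (item : List String) (out : String) : Prop := out = get_next_item_alt str_a item
instance (str_a : String) (item : List String) (out : String) : Decidable (Spec_get_next_item str_a item out) := by unfold Spec_get_next_item; infer_instance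

-- ===== CLAIM =====
def Claim_equal_get_next_item : Prop := ∀ (str_a : String) (item : List String), Dom_get_next_item str_a item → Pre_get_next_item str_a item → Spec_get_next_item str_a item (get_next_item str_a item)

-- ===== LEMMAS AND PROOFS =====

theorem gni_delim_eq (c : Char) : (['(', ')', '&', '|'].contains c) = gniDelim c := by
  simp only [List.contains_cons, List.contains_nil, gniDelim, Bool.or_false]
  rw [Bool.or_assoc, Bool.or_assoc]

-- no delimiter: the accumulator keeps the whole list
theorem gni_buf_of_scan_none (cs : List Char) (h : gniScanA cs = none) : gniBuf cs = cs := by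
  induction cs with
  | nil => rfl
  | cons c rest ih =>
    rw [gniScanA] at h
    by_cases hd : gniDelim c = true
    · rw [if_pos hd] at h; exact absurd h (by simp)
    · rw [if_neg hd] at h
      rw [gniBuf, gni_delim_eq, if_neg hd, ih (by simpa using h)]

-- a delimiter at index i: the accumulator has exactly i characters
theorem gni_buf_of_scan_some (cs : List Char) (i : Nat) (h : gniScanA cs = some i) :
    (gniBuf cs).length = i := by
  induction cs generalizing i with
  | nil => exact absurd h (by simp [gniScanA])
  | cons c rest ih =>
    rw [gniScanA] at h
    by_cases hd : gniDelim c = true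
    · rw [if_pos hd] at h
      rw [gniBuf, gni_delim_eq, if_pos hd]
      simp [(Option.some_inj.mp h)]
    · rw [if_neg hd] at h
      cases hs : gniScanA rest with
      | none => rw [hs] at h; exact absurd h (by simp)
      | some j =>
        rw [hs] at h
        rw [gniBuf, gni_delim_eq, if_neg hd]
        simp only [List.length_cons, ih j hs]
        simpa using Option.some_inj.mp h

-- ===== VERDICT =====
theorem get_next_item_spec : Claim_equal_get_next_item := by
  intro str_a item _ _
  unfold Spec_get_next_item get_next_item get_next_item_alt
  cases hcs : str_a.toList with
  | nil => rfl
  | cons c rest =>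
    simp only []
    rw [gni_delim_eq]
    by_cases hd : gniDelim c = true
    · rw [if_pos hd, if_pos hd]
    · rw [if_neg hd, if_neg hd]
      cases hs : gniScanA (c :: rest) with
      | none => rw [gni_buf_of_scan_none _ hs, List.drop_length]; rfl
      | some i => rw [gni_buf_of_scan_some _ i hs]
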